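-- pv_equiv track=rewrite | github.com/lly1214/CAU-T2T-Sheep | 02_Polish/bin/bin/process_bam.py | adjust_cigar_end
-- ===== SOURCE A (Python) =====
-- def adjust_cigar_end(rstart, r_new_start, cigar_tuples):
-- 	new_cigar = list()
-- 	q_new_start = -1                         # query
-- 	r_coor, q_coor = rstart, 0               # ref, query
-- 	for tag, length in cigar_tuples:
-- 		if tag == 0 or tag == 7 or tag == 8:  # M, =, X
-- 			if r_coor <= r_new_start <= r_coor + length - 1:
-- 				q_new_start = q_coor + r_new_start - r_coor
-- 				new_cigar.append((tag, r_new_start - r_coor + 1))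
-- 				break
-- 			r_coor += length
-- 			q_coor += length
-- 		elif tag == 1 or tag == 4:  # I, S
-- 			q_coor += length
-- 		elif tag == 2:  # D
-- 			if r_coor <= r_new_start <= r_coor + length - 1:
-- 				q_new_start = q_coor - 1
-- 				new_cigar.append((tag, r_new_start - r_coor + 1))
-- 				break
-- 			r_coor += length
-- 		new_cigar.append((tag, length))
-- 	return q_new_start, new_cigar
-- ===== SOURCE B (Python) =====
-- def adjust_cigar_end(rstart, r_new_start, cigar_tuples):
--     # Pass 1: the (ref, query) coordinate reached before each cigar element.
--     pref = []
--     r, q = rstart, 0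
--     for tag, length in cigar_tuples:
--         pref.append((r, q))
--         if tag in (0, 7, 8):      # M, =, X
--             r += length
--             q += length
--         elif tag in (1, 4):       # I, S
--             q += length
--         elif tag == 2:            # D
--             r += length
--     # Pass 2: first ref-consuming element whose ref span contains r_new_start.
--     for i, ((tag, length), (r0, q0)) in enumerate(zip(cigar_tuples, pref)):
--         if tag in (0, 2, 7, 8) and r0 <= r_new_start < r0 + length:
--             q_new = q0 - 1 if tag == 2 else q0 + (r_new_start - r0)
--             return q_new, list(cigar_tuples[:i]) + [(tag, r_new_start - r0 + 1)]
--     return -1, list(cigar_tuples)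
-- ===== Notes on version B (the rewrite author's own statement) =====
-- stated objective: alternative
-- what changed: B splits the work into a coordinate prefix scan plus a separate breakpoint search with one combined hit test, and builds the result by slicing the input instead of A's incremental append-per-element loop with in-loop breaks.
import Mathlib
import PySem

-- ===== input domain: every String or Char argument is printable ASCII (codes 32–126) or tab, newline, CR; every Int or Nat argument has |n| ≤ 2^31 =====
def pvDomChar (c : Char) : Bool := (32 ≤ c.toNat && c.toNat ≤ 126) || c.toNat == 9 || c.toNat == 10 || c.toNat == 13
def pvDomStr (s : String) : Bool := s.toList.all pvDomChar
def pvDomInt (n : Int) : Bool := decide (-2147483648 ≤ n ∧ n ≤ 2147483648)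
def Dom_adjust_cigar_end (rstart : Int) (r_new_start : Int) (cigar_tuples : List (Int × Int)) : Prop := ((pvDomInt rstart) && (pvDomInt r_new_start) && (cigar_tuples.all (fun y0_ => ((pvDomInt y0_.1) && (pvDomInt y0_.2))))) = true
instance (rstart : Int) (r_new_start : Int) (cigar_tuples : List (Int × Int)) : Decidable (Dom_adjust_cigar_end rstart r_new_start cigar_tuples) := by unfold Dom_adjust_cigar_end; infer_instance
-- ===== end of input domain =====

-- B: two-phase prefix-scan + breakpoint search instead of A's incremental append loop (alternative decomposition; return value only).
-- ===== PORT A =====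
-- A's loop: walks cigar_tuples carrying (r_coor, q_coor) and the list built so far; breaks with a truncated element on a hit.
def aLoop (rns : Int) (r q : Int) (acc : List (Int × Int)) : List (Int × Int) → Int × (List (Int × Int))
  | [] => (-1, acc)
  | (tag, len) :: rest =>
    if tag = 0 ∨ tag = 7 ∨ tag = 8 then
      if r ≤ rns ∧ rns ≤ r + len - 1 then
        (q + rns - r, acc ++ [(tag, rns - r + 1)])
      else aLoop rns (r + len) (q + len) (acc ++ [(tag, len)]) rest
    else if tag = 1 ∨ tag = 4 then
      aLoop rns r (q + len) (acc ++ [(tag, len)]) rest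
    else if tag = 2 then
      if r ≤ rns ∧ rns ≤ r + len - 1 then
        (q - 1, acc ++ [(tag, rns - r + 1)])
      else aLoop rns (r + len) q (acc ++ [(tag, len)]) rest
    else aLoop rns r q (acc ++ [(tag, len)]) rest

def adjust_cigar_end (rstart : Int) (r_new_start : Int) (cigar_tuples : List (Int × Int)) : Int × (List (Int × Int)) :=
  aLoop r_new_start rstart 0 [] cigar_tuples

-- ===== PORT B =====
-- B pass 1: the (ref, query) coordinate reached before each cigar element.
def bScan (r q : Int) : List (Int × Int) → List (Int × Int)
  | [] => []
  | (tag, len) :: rest =>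
    (r, q) :: bScan (if tag = 0 ∨ tag = 7 ∨ tag = 8 then r + len else if tag = 2 then r + len else r)
                    (if tag = 0 ∨ tag = 7 ∨ tag = 8 then q + len else if tag = 1 ∨ tag = 4 then q + len else q) rest

-- B pass 2: first ref-consuming element whose ref span contains rns (zip of elements with their prefix coordinates, enumerated from i).
def bFind (rns : Int) (i : Nat) : List ((Int × Int) × (Int × Int)) → Option (Nat × Int × (Int × Int))
  | [] => none
  | ((tag, len), (r0, q0)) :: rest =>
    if (tag = 0 ∨ tag = 2 ∨ tag = 7 ∨ tag = 8) ∧ r0 ≤ rns ∧ rns < r0 + len then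
      some (i, (if tag = 2 then q0 - 1 else q0 + (rns - r0)), (tag, rns - r0 + 1))
    else bFind rns (i + 1) rest

def adjust_cigar_end_alt (rstart : Int) (r_new_start : Int) (cigar_tuples : List (Int × Int)) : Int × (List (Int × Int)) :=
  match bFind r_new_start 0 (cigar_tuples.zip (bScan rstart 0 cigar_tuples)) with
  | some (i, q_new, t) => (q_new, cigar_tuples.take i ++ [t])
  | none => (-1, cigar_tuples)


-- ===== PRECONDITION & SPEC =====
def Spec_adjust_cigar_end (rstart : Int) (r_new_start : Int) (cigar_tuples : List (Int × Int)) (out : Int × (List (Int × Int))) : Prop := out = adjust_cigar_end_alt rstart r_new_start cigar_tuples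
instance (rstart : Int) (r_new_start : Int) (cigar_tuples : List (Int × Int)) (out : Int × (List (Int × Int))) : Decidable (Spec_adjust_cigar_end rstart r_new_start cigar_tuples out) := by unfold Spec_adjust_cigar_end; infer_instance

-- ===== CLAIM (what is proved, stated in full; the proofs are below) =====
def Claim_equal_adjust_cigar_end : Prop := ∀ (rstart : Int) (r_new_start : Int) (cigar_tuples : List (Int × Int)), Dom_adjust_cigar_end rstart r_new_start cigar_tuples → Spec_adjust_cigar_end rstart r_new_start cigar_tuples (adjust_cigar_end rstart r_new_start cigar_tuples)

-- ===== LEMMAS AND PROOFS =====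

lemma bFind_ge (rns : Int) : ∀ (zs : List ((Int × Int) × (Int × Int))) (i j : Nat) (qn : Int) (t : Int × Int),
    bFind rns i zs = some (j, qn, t) → i ≤ j := by
  intro zs
  induction zs with
  | nil => intro i j qn t h; simp [bFind] at h
  | cons x rest ih =>
    obtain ⟨⟨tag, len⟩, r0, q0⟩ := x
    intro i j qn t h
    by_cases hc : (tag = 0 ∨ tag = 2 ∨ tag = 7 ∨ tag = 8) ∧ r0 ≤ rns ∧ rns < r0 + len
    · simp [bFind, hc] at h; omega
    · simp [bFind, hc] at h
      have := ih (i + 1) j qn t h; omega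

-- one non-breakpoint step of B's search, pushed through the result shape
lemma shift (rns : Int) (i : Nat) (tag len r0 q0 : Int) (zs : List ((Int × Int) × (Int × Int)))
    (rest : List (Int × Int)) (acc : List (Int × Int))
    (hc : ¬ ((tag = 0 ∨ tag = 2 ∨ tag = 7 ∨ tag = 8) ∧ r0 ≤ rns ∧ rns < r0 + len)) :
    (match bFind rns (i + 1) zs with
      | some (j, qn, t) => (qn, (acc ++ [(tag, len)]) ++ rest.take (j - (i + 1)) ++ [t])
      | none => ((-1 : Int), (acc ++ [(tag, len)]) ++ rest)) =
    (match bFind rns i (((tag, len), (r0, q0)) :: zs) with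
      | some (j, qn, t) => (qn, acc ++ (((tag, len) :: rest).take (j - i)) ++ [t])
      | none => ((-1 : Int), acc ++ (tag, len) :: rest)) := by
  rw [show bFind rns i (((tag, len), (r0, q0)) :: zs) = bFind rns (i + 1) zs from by
    simp [bFind, hc]]
  rcases hfind : bFind rns (i + 1) zs with _ | ⟨j, qn, t⟩
  · simp
  · have hij := bFind_ge rns zs (i + 1) j qn t hfind
    have h1 : j - i = (j - (i + 1)) + 1 := by omega
    simp [h1]

lemma main_lemma (rns : Int) : ∀ (l : List (Int × Int)) (r q : Int) (acc : List (Int × Int)) (i : Nat),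
    aLoop rns r q acc l =
      match bFind rns i (l.zip (bScan r q l)) with
      | some (j, qn, t) => (qn, acc ++ l.take (j - i) ++ [t])
      | none => ((-1 : Int), acc ++ l) := by
  intro l
  induction l with
  | nil => intro r q acc i; simp [aLoop, bScan, bFind]
  | cons x rest ih =>
    obtain ⟨tag, len⟩ := x
    intro r q acc i
    simp only [bScan, List.zip_cons_cons]
    by_cases hM : tag = 0 ∨ tag = 7 ∨ tag = 8
    · by_cases hhit : r ≤ rns ∧ rns ≤ r + len - 1
      · have hc : (tag = 0 ∨ tag = 2 ∨ tag = 7 ∨ tag = 8) ∧ r ≤ rns ∧ rns < r + len :=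
          ⟨by tauto, hhit.1, by omega⟩
        have h2 : ¬ tag = 2 := by rcases hM with h | h | h <;> omega
        simp [aLoop, bFind, hM, hhit, hc, h2]
        ring
      · have hc : ¬ ((tag = 0 ∨ tag = 2 ∨ tag = 7 ∨ tag = 8) ∧ r ≤ rns ∧ rns < r + len) := by
          intro h; exact hhit ⟨h.2.1, by omega⟩
        rw [show aLoop rns r q acc ((tag, len) :: rest)
              = aLoop rns (r + len) (q + len) (acc ++ [(tag, len)]) rest from by
            simp [aLoop, hM]
            intro h1 h2
            exact absurd ⟨h1, by omega⟩ hhit]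
        rw [ih (r + len) (q + len) (acc ++ [(tag, len)]) (i + 1)]
        rw [show bScan (if tag = 0 ∨ tag = 7 ∨ tag = 8 then r + len else if tag = 2 then r + len else r)
              (if tag = 0 ∨ tag = 7 ∨ tag = 8 then q + len else if tag = 1 ∨ tag = 4 then q + len else q) rest
              = bScan (r + len) (q + len) rest from by simp [hM]]
        exact shift rns i tag len r q _ rest acc hc
    · by_cases hIS : tag = 1 ∨ tag = 4
      · have hc : ¬ ((tag = 0 ∨ tag = 2 ∨ tag = 7 ∨ tag = 8) ∧ r ≤ rns ∧ rns < r + len) := by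
          rintro ⟨h, -⟩; rcases hIS with h1 | h1 <;> rcases h with h2 | h2 | h2 | h2 <;> omega
        rw [show aLoop rns r q acc ((tag, len) :: rest)
              = aLoop rns r (q + len) (acc ++ [(tag, len)]) rest from by
            simp [aLoop, hM, hIS]]
        rw [ih r (q + len) (acc ++ [(tag, len)]) (i + 1)]
        rw [show bScan (if tag = 0 ∨ tag = 7 ∨ tag = 8 then r + len else if tag = 2 then r + len else r)
              (if tag = 0 ∨ tag = 7 ∨ tag = 8 then q + len else if tag = 1 ∨ tag = 4 then q + len else q) rest
              = bScan r (q + len) rest from by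
            have h2 : ¬ tag = 2 := by rcases hIS with h | h <;> omega
            simp [hM, hIS, h2]]
        exact shift rns i tag len r q _ rest acc hc
      · by_cases hD : tag = 2
        · subst hD
          by_cases hhit : r ≤ rns ∧ rns ≤ r + len - 1
          · have hc : ((2 : Int) = 0 ∨ (2 : Int) = 2 ∨ (2 : Int) = 7 ∨ (2 : Int) = 8) ∧ r ≤ rns ∧ rns < r + len :=
              ⟨by norm_num, hhit.1, by omega⟩
            simp [aLoop, bFind, hhit, hc]
          · have hc : ¬ (((2 : Int) = 0 ∨ (2 : Int) = 2 ∨ (2 : Int) = 7 ∨ (2 : Int) = 8) ∧ r ≤ rns ∧ rns < r + len) := by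
              intro h; exact hhit ⟨h.2.1, by omega⟩
            rw [show aLoop rns r q acc (((2 : Int), len) :: rest)
                  = aLoop rns (r + len) q (acc ++ [((2 : Int), len)]) rest from by
                norm_num [aLoop]
                intro h1 h2
                exact absurd ⟨h1, by omega⟩ hhit]
            rw [ih (r + len) q (acc ++ [((2 : Int), len)]) (i + 1)]
            rw [show bScan (if (2 : Int) = 0 ∨ (2 : Int) = 7 ∨ (2 : Int) = 8 then r + len else if (2 : Int) = 2 then r + len else r)
                  (if (2 : Int) = 0 ∨ (2 : Int) = 7 ∨ (2 : Int) = 8 then q + len else if (2 : Int) = 1 ∨ (2 : Int) = 4 then q + len else q) rest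
                  = bScan (r + len) q rest from by norm_num]
            exact shift rns i 2 len r q _ rest acc hc
        · have hc : ¬ ((tag = 0 ∨ tag = 2 ∨ tag = 7 ∨ tag = 8) ∧ r ≤ rns ∧ rns < r + len) := by
            rintro ⟨h, -⟩; tauto
          rw [show aLoop rns r q acc ((tag, len) :: rest)
                = aLoop rns r q (acc ++ [(tag, len)]) rest from by
              simp [aLoop, hM, hIS, hD]]
          rw [ih r q (acc ++ [(tag, len)]) (i + 1)]
          rw [show bScan (if tag = 0 ∨ tag = 7 ∨ tag = 8 then r + len else if tag = 2 then r + len else r)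
                (if tag = 0 ∨ tag = 7 ∨ tag = 8 then q + len else if tag = 1 ∨ tag = 4 then q + len else q) rest
                = bScan r q rest from by simp [hM, hIS, hD]]
          exact shift rns i tag len r q _ rest acc hc

-- ===== VERDICT (by name: the statement is the Claim_ definition above) =====
theorem adjust_cigar_end_spec : Claim_equal_adjust_cigar_end := by
  intro rstart rns ct _
  unfold Spec_adjust_cigar_end adjust_cigar_end adjust_cigar_end_alt
  rw [main_lemma rns ct rstart 0 [] 0]
  rcases h : bFind rns 0 (ct.zip (bScan rstart 0 ct)) with _ | ⟨j, qn, t⟩ <;> simp
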